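-- pv_equiv track=rewrite | github.com/deeppavlov/dialogue2graph | dialog2graph/pipelines/core/dialog_sampling.py | remove_duplicated_paths
-- ===== SOURCE A (Python) =====
-- def remove_duplicated_paths(node_paths: list[list[int]]) -> list[list[int]]:
--     """Remove duplicating paths from node_paths
--
--     Args:
--         node_paths: list of dialog graph paths in a form of node ids
--
--     Returns:
--         List of node paths without duplications
--     """
--     edges = set()
--     res = []
--     for path in node_paths:
--         path_edges = set((path[i], path[i + 1]) for i in range(len(path) - 1))
--         if not path_edges.issubset(edges):
--             edges.update(path_edges)
--             res.append(path)
--     return res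
-- ===== SOURCE B (Python) =====
-- def remove_duplicated_paths(node_paths: list[list[int]]) -> list[list[int]]:
--     """Two-pass first-occurrence pass: record each edge's first path index, then
--     keep exactly the paths owning at least one edge first seen in them.
--
--     Correct because A's accumulated edge set, although updated only on kept
--     paths, always equals the union of edges of ALL paths processed so far
--     (a skipped path's edges are already all present), so a path is kept iff
--     one of its edges occurs in no earlier path.
--     """
--     first = {}
--     for idx, path in enumerate(node_paths):
--         for pair in zip(path, path[1:]):
--             if pair not in first:
--                 first[pair] = idx
--     return [path for idx, path in enumerate(node_paths)
--             if any(first[pair] == idx for pair in zip(path, path[1:]))]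
-- ===== Notes on version B (the rewrite author's own statement) =====
-- stated objective: alternative
-- what changed: Replaces A's online accumulation (grow a global edge set and decide each path against the current state) with a two-pass algorithm: a first pass builds a dict mapping every edge to the index of the first path containing it, and a second pass keeps exactly the paths that own an edge whose first-occurrence index is their own; no result-dependent state is threaded through the decision.
import Mathlib
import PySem

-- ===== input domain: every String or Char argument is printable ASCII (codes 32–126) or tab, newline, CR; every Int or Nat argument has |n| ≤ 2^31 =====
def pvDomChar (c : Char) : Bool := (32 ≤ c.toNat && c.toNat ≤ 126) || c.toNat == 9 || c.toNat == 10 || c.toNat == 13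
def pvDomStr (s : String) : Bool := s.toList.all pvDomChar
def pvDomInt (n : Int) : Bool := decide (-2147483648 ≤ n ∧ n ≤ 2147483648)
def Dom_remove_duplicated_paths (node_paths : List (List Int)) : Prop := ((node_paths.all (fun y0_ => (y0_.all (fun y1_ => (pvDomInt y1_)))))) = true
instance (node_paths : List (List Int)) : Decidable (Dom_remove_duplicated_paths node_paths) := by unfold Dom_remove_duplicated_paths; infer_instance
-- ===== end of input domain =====

-- B replaces A's online set accumulation by a two-pass algorithm (first-occurrence
-- index per edge, then a filter); same return values, a different decomposition.

-- ===== PORT A =====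
def remove_duplicated_paths (node_paths : List (List Int)) : List (List Int) :=
  (node_paths.foldl
    (fun (st : PySem.Set (Int × Int) × List (List Int)) path =>
      let path_edges : PySem.Set (Int × Int) :=
        PySem.Set.ofList ((PySem.List.pyRange 0 ((path.length : Int) - 1) 1).map
          (fun i => (PySem.List.pyGetD path i 0, PySem.List.pyGetD path (i + 1) 0)))
      if ¬ (PySem.Set.issubset path_edges st.1 = true) then
        (PySem.Set.update st.1 path_edges, st.2 ++ [path])
      else st)
    (PySem.Set.empty, ([] : List (List Int)))).2

-- ===== PORT B =====
-- `first[pair]` in the comprehension never raises (pair comes from the current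
-- path, so it is a key of `first`); ported as get? compared with some idx.
def remove_duplicated_paths_alt (node_paths : List (List Int)) : List (List Int) :=
  let first : PySem.Dict (Int × Int) Int :=
    (PySem.List.enumerate node_paths).foldl
      (fun d ip =>
        (ip.2.zip (PySem.List.slice ip.2 (some 1) none)).foldl
          (fun d pair =>
            if ¬ (PySem.Dict.contains d pair = true) then PySem.Dict.insert d pair ip.1 else d)
          d)
      PySem.Dict.empty
  ((PySem.List.enumerate node_paths).filter
    (fun ip => (ip.2.zip (PySem.List.slice ip.2 (some 1) none)).any
        (fun pair => PySem.Dict.get? first pair == some ip.1))).map (·.2)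

-- ===== PRECONDITION & SPEC =====
def Spec_remove_duplicated_paths (node_paths : List (List Int)) (out : List (List Int)) : Prop := out = remove_duplicated_paths_alt node_paths
instance (node_paths : List (List Int)) (out : List (List Int)) : Decidable (Spec_remove_duplicated_paths node_paths out) := by unfold Spec_remove_duplicated_paths; infer_instance

-- ===== CLAIM (what is proved, stated in full; the proofs are below) =====
def Claim_equal_remove_duplicated_paths : Prop := ∀ (node_paths : List (List Int)), Dom_remove_duplicated_paths node_paths → Spec_remove_duplicated_paths node_paths (remove_duplicated_paths node_paths)

-- ===== LEMMAS AND PROOFS =====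

-- consecutive pairs of a path
def pvPairs (p : List Int) : List (Int × Int) := p.zip p.tail

-- "edge e occurs in no path of done"
def pvNew (done : List (List Int)) (e : Int × Int) : Bool :=
  !(done.any (fun q => decide (e ∈ pvPairs q)))

-- reference recursion both ports are reduced to
def pvSpec (done : List (List Int)) : List (List Int) → List (List Int)
  | [] => []
  | p :: l =>
      if (pvPairs p).any (pvNew done) then p :: pvSpec (done ++ [p]) l
      else pvSpec (done ++ [p]) l

-- first-occurrence index of e among indexed paths
def pvFirstIdx (ps : List (Int × List Int)) (e : Int × Int) : Option Int :=
  match ps with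
  | [] => none
  | (i, q) :: rest => if e ∈ pvPairs q then some i else pvFirstIdx rest e

theorem pvAny_congr {α : Type} (l : List α) (f g : α → Bool)
    (h : ∀ x ∈ l, f x = g x) : l.any f = l.any g := by
  induction l with
  | nil => rfl
  | cons a l ih =>
    simp only [List.any_cons, h a (List.mem_cons_self), ih (fun x hx => h x (List.mem_cons_of_mem a hx))]

-- A's index-comprehension over range(len(path)-1) builds exactly zip(path, path[1:]).
theorem pvPairs_eq (path : List Int) :
    (PySem.List.pyRange 0 ((path.length : Int) - 1) 1).map
      (fun i => (PySem.List.pyGetD path i 0, PySem.List.pyGetD path (i + 1) 0))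
    = pvPairs path := by
  apply List.ext_getElem
  · simp [PySem.List.length_pyRange_one, pvPairs]
  · intro k h1 h2
    simp only [List.getElem_map, PySem.List.getElem_pyRange_one, pvPairs, List.getElem_zip,
      List.getElem_tail, Prod.mk.injEq]
    have hk : k < path.length - 1 := by
      simpa [PySem.List.length_pyRange_one] using h1
    constructor
    · have : (0 : Int) + (k : Int) = ((k : Nat) : Int) := by omega
      rw [this, PySem.List.pyGetD_natCast]
      simp [List.getD, List.getElem?_eq_getElem (by omega : k < path.length)]
    · have : (0 : Int) + (k : Int) + 1 = (((k + 1) : Nat) : Int) := by omega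
      rw [this, PySem.List.pyGetD_natCast]
      simp [List.getD, List.getElem?_eq_getElem (by omega : k + 1 < path.length)]

-- inner dict-building loop of B's first pass
theorem pvInnerDict (l : List (Int × Int)) (d : PySem.Dict (Int × Int) Int) (i : Int)
    (e : Int × Int) :
    (l.foldl
      (fun d pair =>
        if ¬ (PySem.Dict.contains d pair = true) then PySem.Dict.insert d pair i else d)
      d).get? e
    = (d.get? e).or (if e ∈ l then some i else none) := by
  induction l generalizing d with
  | nil => cases h : d.get? e <;> simp [h]
  | cons p l ih =>
    rw [List.foldl_cons]
    by_cases hc : PySem.Dict.contains d p = true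
    · rw [if_neg (not_not_intro hc), ih]
      have hs : (d.get? p).isSome := by rw [← PySem.Dict.contains_eq_isSome_get?]; exact hc
      by_cases hep : e = p
      · subst hep
        obtain ⟨v, hv⟩ := Option.isSome_iff_exists.mp hs
        simp [hv]
      · simp [List.mem_cons, hep]
    · rw [if_pos (by simpa using hc), ih]
      have hn : d.get? p = none := by
        cases hdp : d.get? p with
        | none => rfl
        | some v => exact absurd (by rw [PySem.Dict.contains_eq_isSome_get?, hdp]; rfl) hc
      by_cases hep : e = p
      · subst hep
        rw [PySem.Dict.get?_insert_self, hn]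
        simp
      · rw [PySem.Dict.get?_insert_of_ne _ _ hep]
        simp [List.mem_cons, hep]

-- B's whole first pass computes first-occurrence indices
theorem pvFoldDict (ps : List (Int × List Int)) (d : PySem.Dict (Int × Int) Int)
    (e : Int × Int) :
    (ps.foldl
      (fun d ip =>
        (ip.2.zip ip.2.tail).foldl
          (fun d pair =>
            if ¬ (PySem.Dict.contains d pair = true) then PySem.Dict.insert d pair ip.1 else d)
          d)
      d).get? e
    = (d.get? e).or (pvFirstIdx ps e) := by
  induction ps generalizing d with
  | nil => cases h : d.get? e <;> simp [pvFirstIdx, h]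
  | cons ip ps ih =>
    rw [List.foldl_cons, ih, pvInnerDict]
    show _ = (d.get? e).or (pvFirstIdx (ip :: ps) e)
    cases ip with
    | mk i q =>
      simp only [pvFirstIdx]
      by_cases he : e ∈ pvPairs q
      · rw [if_pos (by simpa [pvPairs] using he), if_pos he]
        cases d.get? e <;> simp
      · rw [if_neg (by simpa [pvPairs] using he), if_neg he]
        cases d.get? e <;> simp

theorem pvFirstIdx_none (xs : List (List Int)) (s : Int) (e : Int × Int) :
    pvFirstIdx (PySem.List.enumerate xs s) e = none ↔ ∀ q ∈ xs, e ∉ pvPairs q := by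
  induction xs generalizing s with
  | nil => simp [PySem.List.enumerate_nil, pvFirstIdx]
  | cons p xs ih =>
    rw [PySem.List.enumerate_cons]
    simp only [pvFirstIdx]
    by_cases he : e ∈ pvPairs p
    · simp [he]
    · rw [if_neg he, ih]
      simp [he]

theorem pvFirstIdx_bound (xs : List (List Int)) (s : Int) (e : Int × Int) (j : Int)
    (h : pvFirstIdx (PySem.List.enumerate xs s) e = some j) : s ≤ j := by
  induction xs generalizing s with
  | nil => simp [PySem.List.enumerate_nil, pvFirstIdx] at h
  | cons p xs ih =>
    rw [PySem.List.enumerate_cons] at h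
    simp only [pvFirstIdx] at h
    by_cases he : e ∈ pvPairs p
    · rw [if_pos he] at h
      have := Option.some.inj h
      omega
    · rw [if_neg he] at h
      have := ih (s + 1) h
      omega

theorem pvFirstIdx_ubound (xs : List (List Int)) (s : Int) (e : Int × Int) (j : Int)
    (h : pvFirstIdx (PySem.List.enumerate xs s) e = some j) : j < s + xs.length := by
  induction xs generalizing s with
  | nil => simp [PySem.List.enumerate_nil, pvFirstIdx] at h
  | cons p xs ih =>
    rw [PySem.List.enumerate_cons] at h
    simp only [pvFirstIdx] at h
    by_cases he : e ∈ pvPairs p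
    · rw [if_pos he] at h
      have := Option.some.inj h
      simp [List.length_cons]
      omega
    · rw [if_neg he] at h
      have := ih (s + 1) h
      simp [List.length_cons]
      omega

theorem pvFirstIdx_append (xs ys : List (Int × List Int)) (e : Int × Int) :
    pvFirstIdx (xs ++ ys) e = (pvFirstIdx xs e).or (pvFirstIdx ys e) := by
  induction xs with
  | nil => simp [pvFirstIdx]
  | cons p xs ih =>
    cases p with
    | mk i q =>
      simp only [List.cons_append, pvFirstIdx]
      by_cases he : e ∈ pvPairs q
      · simp [he]
      · simp [he, ih]

-- key characterisation: for an edge of the path at index |done|, its global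
-- first-occurrence index equals |done| iff no earlier path contains it
theorem pvKey (done : List (List Int)) (p : List Int) (rest : List (List Int))
    (e : Int × Int) (he : e ∈ pvPairs p) :
    (pvFirstIdx (PySem.List.enumerate (done ++ p :: rest) 0) e = some (done.length : Int))
      ↔ pvNew done e = true := by
  rw [PySem.List.enumerate_append, pvFirstIdx_append]
  have hhead : pvFirstIdx (PySem.List.enumerate (p :: rest) (0 + (done.length : Int))) e
      = some (done.length : Int) := by
    rw [PySem.List.enumerate_cons]
    simp [pvFirstIdx, he]
  rw [hhead]
  cases hd : pvFirstIdx (PySem.List.enumerate done 0) e with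
  | none =>
    simp only [Option.or]
    have hall := (pvFirstIdx_none done 0 e).mp hd
    constructor
    · intro _
      simp only [pvNew, Bool.not_eq_true', List.any_eq_false]
      intro q hq
      simpa using hall q hq
    · intro _; trivial
  | some j =>
    simp only [Option.or]
    constructor
    · intro hj
      have hjs : j = (done.length : Int) := Option.some.inj hj
      exfalso
      have hne : ¬ (pvFirstIdx (PySem.List.enumerate done 0) e = none) := by simp [hd]
      rw [pvFirstIdx_none] at hne
      push Not at hne
      obtain ⟨q, hq, hqe⟩ := hne
      obtain ⟨k, hk, rfl⟩ := List.mem_iff_getElem.mp hq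
      have hsplit : done = done.take k ++ done[k] :: done.drop (k + 1) := by
        rw [List.getElem_cons_drop]
        exact (List.take_append_drop k done).symm
      rw [hsplit, PySem.List.enumerate_append, pvFirstIdx_append] at hd
      have hlen : ((done.take k).length : Int) = (k : Int) := by
        simp [List.length_take, Nat.min_eq_left (le_of_lt hk)]
      cases hpre : pvFirstIdx (PySem.List.enumerate (done.take k) 0) e with
      | some j' =>
        rw [hpre] at hd
        simp only [Option.or] at hd
        have hj' : j' = j := Option.some.inj hd
        have hb := pvFirstIdx_bound _ _ _ _ hpre
        -- but also j' is bounded above by k: contradiction with j = done.length needs upper bound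
        -- derive upper bound from hpre by a second bound lemma
        have hub := pvFirstIdx_ubound _ _ _ _ hpre
        rw [hlen] at hub
        have hkd : (k : Int) < (done.length : Int) := by exact_mod_cast hk
        omega
      | none =>
        rw [hpre] at hd
        simp only [Option.or] at hd
        rw [PySem.List.enumerate_cons] at hd
        simp only [pvFirstIdx, if_pos hqe] at hd
        have h0 : (0 : Int) + ((done.take k).length : Int) = j := Option.some.inj hd
        have hkd : (k : Int) < (done.length : Int) := by exact_mod_cast hk
        omega
    · intro hnew
      exfalso
      have hnone := (pvFirstIdx_none done 0 e).mpr ?_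
      · rw [hd] at hnone; simp at hnone
      · intro q hq
        simp only [pvNew, Bool.not_eq_true', List.any_eq_false] at hnew
        simpa using hnew q hq

-- A's outer fold reduces to pvSpec
theorem pvA (l : List (List Int)) (done : List (List Int)) (eA : PySem.Set (Int × Int))
    (res : List (List Int)) (h : ∀ x, x ∈ eA ↔ ∃ q ∈ done, x ∈ pvPairs q) :
    (l.foldl
      (fun (st : PySem.Set (Int × Int) × List (List Int)) path =>
        let path_edges : PySem.Set (Int × Int) :=
          PySem.Set.ofList ((PySem.List.pyRange 0 ((path.length : Int) - 1) 1).map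
            (fun i => (PySem.List.pyGetD path i 0, PySem.List.pyGetD path (i + 1) 0)))
        if ¬ (PySem.Set.issubset path_edges st.1 = true) then
          (PySem.Set.update st.1 path_edges, st.2 ++ [path])
        else st)
      (eA, res)).2 = res ++ pvSpec done l := by
  induction l generalizing done eA res with
  | nil => simp [pvSpec]
  | cons p l ih =>
    simp only [List.foldl_cons, pvPairs_eq, pvSpec] at ih ⊢
    by_cases hnew : (pvPairs p).any (pvNew done) = true
    · -- some edge of p is new: issubset is false, A appends
      obtain ⟨e, hel, hne⟩ := List.any_eq_true.mp hnew
      have hsub : ¬ PySem.Set.issubset (PySem.Set.ofList (pvPairs p)) eA = true := by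
        rw [PySem.Set.issubset_iff]
        intro hcon
        have : e ∈ eA := hcon e ((PySem.Set.mem_ofList _ e).mpr hel)
        rw [h e] at this
        obtain ⟨q, hq, hqe⟩ := this
        simp [pvNew] at hne
        exact hne q hq hqe
      rw [if_pos hsub, if_pos hnew]
      rw [ih (done ++ [p]) _ _ ?_]
      · simp
      · intro x
        rw [PySem.Set.mem_update, h x, PySem.Set.mem_ofList]
        constructor
        · rintro (⟨q, hq, hx⟩ | hx)
          · exact ⟨q, List.mem_append_left _ hq, hx⟩
          · exact ⟨p, List.mem_append_right _ (List.mem_singleton_self p), hx⟩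
        · rintro ⟨q, hq, hx⟩
          rcases List.mem_append.mp hq with hq | hq
          · exact Or.inl ⟨q, hq, hx⟩
          · rw [List.mem_singleton.mp hq] at hx
            exact Or.inr hx
    · -- no new edge: issubset is true, A skips
      have hall : ∀ e ∈ pvPairs p, e ∈ eA := by
        intro e hel
        have := List.any_eq_false.mp (Bool.eq_false_iff.mpr hnew) e hel
        simp [pvNew] at this
        obtain ⟨q, hq, hqe⟩ := this
        exact (h e).mpr ⟨q, hq, hqe⟩
      have hsub : PySem.Set.issubset (PySem.Set.ofList (pvPairs p)) eA = true := by
        rw [PySem.Set.issubset_iff]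
        intro x hx
        exact hall x ((PySem.Set.mem_ofList _ x).mp hx)
      rw [if_neg (not_not_intro hsub), if_neg hnew]
      apply ih (done ++ [p])
      intro x
      rw [h x]
      constructor
      · rintro ⟨q, hq, hx⟩
        exact ⟨q, List.mem_append_left _ hq, hx⟩
      · rintro ⟨q, hq, hx⟩
        rcases List.mem_append.mp hq with hq | hq
        · exact ⟨q, hq, hx⟩
        · rw [List.mem_singleton.mp hq] at hx
          exact (h x).mp (hall x hx)

-- B's filter over enumerate reduces to pvSpec
theorem pvB (node_paths : List (List Int)) (l done : List (List Int))
    (hsplit : done ++ l = node_paths) :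
    ((PySem.List.enumerate l (done.length : Int)).filter
      (fun ip => (pvPairs ip.2).any
        (fun e => pvFirstIdx (PySem.List.enumerate node_paths 0) e == some ip.1))).map (·.2)
    = pvSpec done l := by
  induction l generalizing done with
  | nil => simp [PySem.List.enumerate_nil, pvSpec]
  | cons p l ih =>
    rw [PySem.List.enumerate_cons, List.filter_cons]
    have hpred : ((pvPairs p).any
        (fun e => pvFirstIdx (PySem.List.enumerate node_paths 0) e == some ((done.length : Int))))
        = (pvPairs p).any (pvNew done) := by
      apply pvAny_congr
      intro e hel
      rw [← hsplit]
      have := pvKey done p l e hel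
      by_cases hn : pvNew done e = true
      · simp [this.mpr hn, hn]
      · rw [Bool.eq_false_iff.mpr hn]
        have : ¬ (pvFirstIdx (PySem.List.enumerate (done ++ p :: l) 0) e
            = some ((done.length : Int))) := fun hh => hn (this.mp hh)
        simpa using this
    have hlen : ((done.length : Int) + 1) = (((done ++ [p]).length : Nat) : Int) := by
      simp
    simp only [pvSpec]
    by_cases hnew : (pvPairs p).any (pvNew done) = true
    · rw [if_pos (by rw [hpred]; exact hnew), if_pos hnew]
      rw [List.map_cons, hlen, ih (done ++ [p]) (by simpa using hsplit)]
    · rw [if_neg (by rw [hpred]; exact hnew), if_neg hnew]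
      rw [hlen, ih (done ++ [p]) (by simpa using hsplit)]

-- ===== VERDICT (by name: the statement is the Claim_ definition above) =====
theorem remove_duplicated_paths_spec : Claim_equal_remove_duplicated_paths := by
  intro node_paths _
  unfold Spec_remove_duplicated_paths remove_duplicated_paths remove_duplicated_paths_alt
  rw [pvA node_paths [] PySem.Set.empty [] (by simp)]
  simp only [List.nil_append]
  rw [← pvB node_paths node_paths [] (by simp)]
  simp only [List.length_nil, Nat.cast_zero]
  apply congrArg
  apply List.filter_congr
  intro ip hip
  simp only [PySem.List.slice_from_one]
  apply pvAny_congr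
  intro e he
  rw [pvFoldDict]
  simp [PySem.Dict.get?_empty]
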